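-- pv_equiv track=rewrite | github.com/LesyaLesya/codewars_python | 6kyu.py | kebabize
-- ===== SOURCE A (Python) =====
-- def kebabize(st):
--     l = ''.join([i for i in st if i.isalpha()])
--     words = []
--     for i in range(len(l)):
--         if l[i].isupper():
--             if i == 0:
--                 words.append(l[i].lower())
--             else:
--                 words.append(':' + l[i].lower())
--         else:
--             words.append(l[i])
--     words = ((''.join(words)).split(':'))
--     return '-'.join(words)
-- ===== SOURCE B (Python) =====
-- def kebabize(st):
--     letters = [c for c in st if c.isalpha()]
--
--     def words(cs):
--         if not cs:
--             return []
--         j = 1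
--         while j < len(cs) and not cs[j].isupper():
--             j += 1
--         return [''.join(cs[:j]).lower()] + words(cs[j:])
--
--     return '-'.join(words(letters))
-- ===== Notes on version B (the rewrite author's own statement) =====
-- stated objective: alternative
-- what changed: Replaced A's filter/sentinel-insertion/split/rejoin pipeline by a recursive word-splitter: filter letters once, then recursively peel off maximal words (a letter plus the following non-uppercase letters), lowercase each word, and join the word list with a dash.
import Mathlib
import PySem

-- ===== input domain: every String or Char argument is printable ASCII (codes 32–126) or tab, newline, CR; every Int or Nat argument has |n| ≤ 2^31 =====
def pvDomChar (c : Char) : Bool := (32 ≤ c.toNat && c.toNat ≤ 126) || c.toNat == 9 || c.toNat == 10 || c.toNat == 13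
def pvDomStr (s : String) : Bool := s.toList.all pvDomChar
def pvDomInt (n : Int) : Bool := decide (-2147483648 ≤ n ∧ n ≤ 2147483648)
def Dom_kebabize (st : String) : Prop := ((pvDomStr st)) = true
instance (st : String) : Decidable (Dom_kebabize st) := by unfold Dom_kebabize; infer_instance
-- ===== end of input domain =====

-- B replaces A's filter / ':'-sentinel / split / rejoin pipeline by a recursive word-splitter
-- (peel off one maximal word at a time, lowercase it, join the words with '-'); objective: alternative.

-- ===== PORT A =====
-- l = ''.join([i for i in st if i.isalpha()]); words built by the index loop
-- for i in range(len(l)) reading l[i] (ported as a map over enumerate, the same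
-- (index, char) pairs in the same order); then ''.join, split(':'), '-'.join.
def kebabize (st : String) : String :=
  let l := st.toList.filter PySem.Chars.isalpha
  let words := (PySem.List.enumerate l).map (fun p =>
    if PySem.Chars.isupper p.2 then
      (if p.1 == 0 then [PySem.Chars.lowerChar p.2] else ':' :: [PySem.Chars.lowerChar p.2])
    else [p.2])
  let parts := PySem.Chars.splitOn (PySem.Chars.join [] words) [':']
  String.ofList (PySem.Chars.join ['-'] parts)

-- ===== PORT B =====
-- words(cs): the while loop scans j from 1 past the non-uppercase letters, so cs[:j] is
-- cs[0] followed by takeWhile(not isupper) of the tail and cs[j:] is the matching dropWhile;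
-- each word is lowercased as a whole (.lower() = map lowerChar).
def kebabizeWords : List Char → List (List Char)
  | [] => []
  | c :: rest =>
    ((c :: rest.takeWhile (fun x => !PySem.Chars.isupper x)).map PySem.Chars.lowerChar)
      :: kebabizeWords (rest.dropWhile (fun x => !PySem.Chars.isupper x))
termination_by cs => cs.length
decreasing_by
  exact Nat.lt_succ_of_le (List.Sublist.length_le (List.dropWhile_sublist _))

def kebabize_alt (st : String) : String :=
  let letters := st.toList.filter PySem.Chars.isalpha
  String.ofList (PySem.Chars.join ['-'] (kebabizeWords letters))

-- ===== PRECONDITION & SPEC =====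
def Spec_kebabize (st : String) (out : String) : Prop := out = kebabize_alt st
instance (st : String) (out : String) : Decidable (Spec_kebabize st out) := by unfold Spec_kebabize; infer_instance

-- ===== CLAIM (what is proved, stated in full; the proofs are below) =====
def Claim_equal_kebabize : Prop := ∀ (st : String), Dom_kebabize st → Spec_kebabize st (kebabize st)

-- ===== LEMMAS AND PROOFS =====

-- substituting '-' for the sentinel ':'
def pvSub (c : Char) : Char := if c = ':' then '-' else c

-- canonical single-pass form both ports are reduced to (proof-only helper):
-- one piece per letter, '-' before an uppercase letter iff a letter came before (flag e).
def canonGo : List Char → Bool → List (List Char)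
  | [], _ => []
  | c :: rest, emitted =>
    if PySem.Chars.isalpha c then
      (if PySem.Chars.isupper c then
        (if emitted then ['-', PySem.Chars.lowerChar c] else [PySem.Chars.lowerChar c])
      else [c]) :: canonGo rest true
    else canonGo rest emitted

lemma intercalate_nil_eq_flatten (ws : List (List Char)) :
    List.intercalate ([] : List Char) ws = ws.flatten := by
  induction ws with
  | nil => simp [List.intercalate]
  | cons w ws ih =>
    cases ws with
    | nil => simp [List.intercalate]
    | cons v vs =>
      simp only [List.intercalate, List.intersperse] at ih ⊢
      simp_all

lemma intercalate_two (acc : List (List Char)) (a b : List Char) :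
    List.intercalate ['-'] (acc ++ [a, b]) = List.intercalate ['-'] (acc ++ [a ++ '-' :: b]) := by
  induction acc with
  | nil => simp [List.intercalate]
  | cons x xs ih =>
    cases xs with
    | nil => simp [List.intercalate, List.intersperse]
    | cons y ys =>
      simp only [List.cons_append, List.intercalate, List.intersperse] at ih ⊢
      simp_all

-- invariant of the fuel-driven split loop, read through the final '-'-join
lemma go_inv (l : List Char) : ∀ (fuel : Nat) (cur : List Char) (acc : List (List Char)),
    l.length ≤ fuel →
    List.intercalate ['-'] (PySem.Chars.splitOn.go [':'] fuel l cur acc) =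
    List.intercalate ['-'] (((cur.reverse ++ l.map pvSub) :: acc).reverse) := by
  induction l with
  | nil =>
    intro fuel cur acc _
    cases fuel <;> simp [PySem.Chars.splitOn.go]
  | cons c rest ih =>
    intro fuel cur acc hf
    cases fuel with
    | zero => simp at hf
    | succ f =>
      simp only [PySem.Chars.splitOn.go]
      by_cases hc : c = ':'
      · subst hc
        rw [if_pos (by simp [List.isPrefixOf])]
        simp only [List.length_cons] at hf
        simp only [List.length_cons, List.length_nil, List.drop_succ_cons, List.drop_zero]
        rw [ih f [] (cur.reverse :: acc) (by omega)]
        simp only [List.map_cons, pvSub, List.reverse_cons, List.nil_append,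
          List.reverse_nil, List.append_assoc]
        have := intercalate_two acc.reverse cur.reverse (List.map pvSub rest)
        simpa using this
      · rw [if_neg (by simp [List.isPrefixOf]; exact fun h => hc h.symm)]
        simp only [List.length_cons] at hf
        rw [ih f (c :: cur) acc (by omega)]
        simp [pvSub, hc]

-- '-'-joining the ':'-split of cs substitutes '-' for ':' in cs.
lemma split_join (cs : List Char) :
    PySem.Chars.join ['-'] (PySem.Chars.splitOn cs [':']) = cs.map pvSub := by
  unfold PySem.Chars.splitOn PySem.Chars.join
  rw [go_inv cs (cs.length + 1) [] [] (by omega)]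
  simp [List.intercalate]

lemma lowerChar_ne_colon (c : Char) (hu : PySem.Chars.isupper c = true) :
    PySem.Chars.lowerChar c ≠ ':' := by
  simp only [PySem.Chars.isupper, Bool.and_eq_true, decide_eq_true_eq] at hu
  simp only [PySem.Chars.lowerChar, PySem.Chars.isupper, Bool.and_eq_true, decide_eq_true_eq,
    if_pos hu]
  intro h
  have hv1 : 65 ≤ c.toNat := hu.1
  have hv2 : c.toNat ≤ 90 := Nat.lt_succ_iff.mp (Nat.lt_succ_of_le hu.2)
  have hval : (Char.ofNat (c.toNat + 32)).toNat = c.toNat + 32 := by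
    simp only [Char.ofNat, dif_pos (Or.inl (by omega) : Nat.isValidChar (c.toNat + 32)),
      Char.ofNatAux]
    rfl
  have h58 : (':' : Char).toNat = 58 := by decide
  have := congrArg Char.toNat h
  rw [hval, h58] at this
  omega

lemma alpha_ne_colon (c : Char) (ha : PySem.Chars.isalpha c = true) : c ≠ ':' := by
  intro h; subst h
  simp [PySem.Chars.isalpha, PySem.Chars.isupper, PySem.Chars.islower] at ha

lemma lowerChar_id_of_not_upper (c : Char) (h : PySem.Chars.isupper c = false) :
    PySem.Chars.lowerChar c = c := by
  simp [PySem.Chars.lowerChar, h]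

-- A side: on an all-letter list, A's enumerate/':'-pieces after substitution are
-- canonGo's pieces; the flag e says whether the running index s is already past 0.
lemma core_eq (l : List Char) : ∀ (s : Int) (e : Bool),
    (∀ c ∈ l, PySem.Chars.isalpha c = true) → 0 ≤ s → (e = false ↔ s = 0) →
    ((PySem.List.enumerate l s).map (fun p =>
      if PySem.Chars.isupper p.2 then
        (if p.1 == 0 then [PySem.Chars.lowerChar p.2] else ':' :: [PySem.Chars.lowerChar p.2])
      else [p.2])).flatten.map pvSub
    = (canonGo l e).flatten := by
  induction l with
  | nil => intro s e _ _ _; simp [PySem.List.enumerate, canonGo]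
  | cons c rest ih =>
    intro s e hall hs he
    have ha : PySem.Chars.isalpha c = true := hall c (by simp)
    have hrest : ∀ x ∈ rest, PySem.Chars.isalpha x = true := fun x hx => hall x (by simp [hx])
    have ihr := ih (s + 1) true hrest (by omega) (by simp; omega)
    rw [PySem.List.enumerate_cons]
    by_cases hu : PySem.Chars.isupper c
    · by_cases h0 : s = 0
      · subst h0
        have he' : e = false := he.mpr rfl
        subst he'
        simp only [List.map_cons, List.flatten_cons, List.map_append, ihr, canonGo, ha,
          if_true, hu, beq_self_eq_true]
        simp [pvSub, lowerChar_ne_colon c hu]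
      · have he' : e = true := by cases e; exact absurd (he.mp rfl) h0; rfl
        subst he'
        simp only [List.map_cons, List.flatten_cons, List.map_append, ihr, canonGo, ha,
          if_true, hu, show (s == 0) = false by simpa using h0]
        simp [pvSub, lowerChar_ne_colon c hu]
    · simp only [List.map_cons, List.flatten_cons, List.map_append, ihr, canonGo, ha,
        if_true, hu, Bool.false_eq_true, if_false]
      simp [pvSub, alpha_ne_colon c ha]

-- B side: crossing a block of non-uppercase letters with the flag already set.
lemma canonGo_body (body : List Char) : ∀ (rem : List Char),
    (∀ x ∈ body, PySem.Chars.isalpha x = true ∧ PySem.Chars.isupper x = false) →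
    canonGo (body ++ rem) true = body.map (fun x => [x]) ++ canonGo rem true := by
  induction body with
  | nil => intro rem _; rfl
  | cons b bs ih =>
    intro rem hall
    have hb := hall b (by simp)
    simp only [List.cons_append, canonGo, hb.1, if_true, hb.2, Bool.false_eq_true, if_false,
      List.map_cons, List.cons_append, ih rem (fun x hx => hall x (by simp [hx]))]

-- B side main lemma: the '-'-join of the word list is the canonical flattened pieces.
lemma flatten_singletons (l : List Char) : (l.map (fun x => [x])).flatten = l := by
  induction l with
  | nil => rfl
  | cons a as ih => simp [ih]

lemma dropWhile_head_false {α : Type} (p : α → Bool) :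
    ∀ (l : List α) (u : α) (t : List α), l.dropWhile p = u :: t → p u = false := by
  intro l
  induction l with
  | nil => intro u t h; simp [List.dropWhile] at h
  | cons a as ih =>
    intro u t h
    by_cases hp : p a = true
    · rw [List.dropWhile_cons_of_pos hp] at h; exact ih u t h
    · rw [List.dropWhile_cons_of_neg hp] at h
      cases h
      simpa using hp

lemma words_eq_aux (n : Nat) : ∀ (cs : List Char), cs.length ≤ n →
    (∀ c ∈ cs, PySem.Chars.isalpha c = true) →
    (canonGo cs false).flatten = List.intercalate ['-'] (kebabizeWords cs) := by
  induction n with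
  | zero =>
    intro cs hlen _
    have : cs = [] := List.eq_nil_of_length_eq_zero (Nat.le_zero.mp hlen)
    subst this
    rw [kebabizeWords]
    simp [canonGo, List.intercalate]
  | succ n ihn =>
    intro cs hlen hall
    cases cs with
    | nil =>
      rw [kebabizeWords]
      simp [canonGo, List.intercalate]
    | cons c rest =>
    have ha : PySem.Chars.isalpha c = true := hall c (by simp)
    set body := rest.takeWhile (fun x => !PySem.Chars.isupper x) with hbodydef
    set rem := rest.dropWhile (fun x => !PySem.Chars.isupper x) with hremdef
    have hsplit : body ++ rem = rest := List.takeWhile_append_dropWhile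
    have hbodyprop : ∀ x ∈ body, PySem.Chars.isalpha x = true ∧ PySem.Chars.isupper x = false := by
      intro x hx
      have hx' : x ∈ rest := by rw [← hsplit]; exact List.mem_append_left _ hx
      have := List.mem_takeWhile_imp hx
      exact ⟨hall x (by simp [hx']), by simpa using this⟩
    have hremprop : ∀ x ∈ rem, PySem.Chars.isalpha x = true := by
      intro x hx
      have hx' : x ∈ rest := by rw [← hsplit]; exact List.mem_append_right _ hx
      exact hall x (by simp [hx'])
    have hremupper : ∀ (u : Char) (t : List Char), rem = u :: t → PySem.Chars.isupper u = true := by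
      intro u t h
      have := dropWhile_head_false (fun x => !PySem.Chars.isupper x) rest u t (hremdef ▸ h)
      simpa using this
    have hremlen : rem.length ≤ rest.length := by
      rw [hremdef]
      exact List.Sublist.length_le (List.dropWhile_sublist _)
    have hbodymap : body.map PySem.Chars.lowerChar = body := by
      apply List.map_congr_left ?_ |>.trans (List.map_id _)
      intro x hx; exact lowerChar_id_of_not_upper x (hbodyprop x hx).2
    have hstep : (canonGo (c :: rest) false).flatten =
        [PySem.Chars.lowerChar c] ++ body ++ (canonGo rem true).flatten := by
      have hhead : (if PySem.Chars.isupper c = true then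
          (if false = true then ['-', PySem.Chars.lowerChar c] else [PySem.Chars.lowerChar c])
        else [c]) = [PySem.Chars.lowerChar c] := by
        cases hu : PySem.Chars.isupper c
        · simp [lowerChar_id_of_not_upper c hu]
        · simp
      simp only [canonGo, ha, if_true, ← hsplit, canonGo_body body rem hbodyprop,
        List.flatten_cons, List.flatten_append, flatten_singletons, hhead]
      simp
    have hwords : kebabizeWords (c :: rest) =
        (PySem.Chars.lowerChar c :: body) :: kebabizeWords rem := by
      rw [kebabizeWords]
      simp only [← hbodydef, ← hremdef, List.map_cons, hbodymap]
    rw [hstep, hwords]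
    clear hbodymap hbodyprop hsplit hbodydef hremdef hall
    clear_value body rem
    cases hrem : rem with
    | nil =>
      subst hrem
      rw [kebabizeWords]
      simp [canonGo, List.intercalate]
    | cons u rem' =>
      subst hrem
      have hu : PySem.Chars.isupper u = true := hremupper u rem' rfl
      have hau : PySem.Chars.isalpha u = true := hremprop u (by simp)
      have hflag : (canonGo (u :: rem') true).flatten
          = '-' :: (canonGo (u :: rem') false).flatten := by
        simp [canonGo, hau, hu]
      have hwne : kebabizeWords (u :: rem') ≠ [] := by
        rw [kebabizeWords]; simp
      have hlen' : (u :: rem').length ≤ n := by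
        simp only [List.length_cons] at hlen hremlen ⊢
        omega
      have ihrem := ihn (u :: rem') hlen' hremprop
      have hic : List.intercalate ['-']
            (((PySem.Chars.lowerChar c :: body) : List Char) :: kebabizeWords (u :: rem'))
          = (PySem.Chars.lowerChar c :: body)
              ++ '-' :: List.intercalate ['-'] (kebabizeWords (u :: rem')) := by
        cases hw : kebabizeWords (u :: rem') with
        | nil => exact absurd hw hwne
        | cons w ws => simp [List.intercalate, List.intersperse]
      rw [hic, ← ihrem, hflag]
      simp

-- ===== VERDICT (by name: the statement is the Claim_ definition above) =====
theorem kebabize_spec : Claim_equal_kebabize := by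
  intro st _
  show kebabize st = kebabize_alt st
  simp only [kebabize, kebabize_alt]
  rw [split_join]
  congr 1
  rw [show PySem.Chars.join ([] : List Char) = fun ws => List.intercalate [] ws from rfl]
  simp only [intercalate_nil_eq_flatten]
  have hfilter : ∀ c ∈ st.toList.filter PySem.Chars.isalpha, PySem.Chars.isalpha c = true :=
    fun c hc => (List.mem_filter.mp hc).2
  rw [core_eq (st.toList.filter PySem.Chars.isalpha) 0 false hfilter le_rfl (by simp)]
  rw [show PySem.Chars.join (['-'] : List Char) = fun ws => List.intercalate ['-'] ws from rfl]
  exact words_eq_aux _ _ le_rfl hfilter
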